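-- pv_equiv track=rewrite | github.com/ChuyueSun/dalek-lite | experiment_results/exp17/strip_proofs.py | find_body_brace
-- ===== SOURCE A (Python) =====
-- def find_body_brace(lines, start_line):
--     """Find the opening brace of the function body.
--
--     Returns (line_idx, col_idx) of the body opening brace.
--     The body brace is the first `{` at paren_depth==0 after the function signature starts.
--     We skip the function params `(...)` by tracking paren depth.
--     """
--     paren_depth = 0
--     brace_depth = 0
--     past_params = False  # True once we've seen the closing `)` of the function params
--
--     for i in range(start_line, len(lines)):
--         for col, ch in enumerate(lines[i]):
--             if ch == '(':
--                 paren_depth += 1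
--             elif ch == ')':
--                 paren_depth -= 1
--                 if paren_depth == 0 and not past_params:
--                     past_params = True
--             elif ch == '{':
--                 if paren_depth == 0 and past_params:
--                     # This is the body opening brace
--                     return (i, col)
--                 brace_depth += 1
--             elif ch == '}':
--                 if paren_depth == 0:
--                     brace_depth -= 1
--                 # else: closing brace inside parens (e.g., ensures block expr)
--
--     return None
-- ===== SOURCE B (Python) =====
-- def find_body_brace(lines, start_line):
--     """Find the opening brace of the function body.
--
--     Two-phase scan: phase 1 finds the `)` that closes the function params
--     (the first `)` that brings paren depth back to exactly 0); phase 2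
--     continues from the position right after it and returns the first `{`
--     seen at paren depth 0. No brace-depth bookkeeping is needed.
--     """
--     depth = 0
--     n = len(lines)
--     for i in range(start_line, n):
--         for col, ch in enumerate(lines[i]):
--             if ch == '(':
--                 depth += 1
--             elif ch == ')':
--                 depth -= 1
--                 if depth == 0:
--                     return _scan_body(lines, i, col + 1, n)
--     return None
--
--
-- def _scan_body(lines, i, col, n):
--     """Return (line, col) of the first '{' at paren depth 0 from (i, col)."""
--     depth = 0
--     line = lines[i]
--     while i < n:
--         while col < len(line):
--             ch = line[col]
--             if ch == '(':
--                 depth += 1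
--             elif ch == ')':
--                 depth -= 1
--             elif ch == '{' and depth == 0:
--                 return (i, col)
--             col += 1
--         i += 1
--         if i < n:
--             line = lines[i]
--         col = 0
--     return None
-- ===== Notes on version B (the rewrite author's own statement) =====
-- stated objective: alternative
-- what changed: Replaces A's single scan carrying a past_params flag and a dead brace_depth counter by a two-phase scan: phase 1 finds the ')' that closes the params (paren depth back to 0), phase 2 resumes right after it and returns the first '{' at paren depth 0; brace_depth bookkeeping is dropped entirely.
import Mathlib
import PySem

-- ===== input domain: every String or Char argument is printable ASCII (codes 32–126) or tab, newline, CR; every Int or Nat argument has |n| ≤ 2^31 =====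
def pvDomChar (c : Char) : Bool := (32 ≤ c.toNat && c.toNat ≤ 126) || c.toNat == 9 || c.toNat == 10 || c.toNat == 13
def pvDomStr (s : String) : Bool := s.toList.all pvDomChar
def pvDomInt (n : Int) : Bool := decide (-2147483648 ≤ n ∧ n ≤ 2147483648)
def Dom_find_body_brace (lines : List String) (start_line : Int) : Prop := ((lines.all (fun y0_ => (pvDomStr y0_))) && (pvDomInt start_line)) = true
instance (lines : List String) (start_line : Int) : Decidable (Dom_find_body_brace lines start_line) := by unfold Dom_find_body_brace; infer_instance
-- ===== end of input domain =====

-- B replaces A's one scan with flag+dead brace_depth bookkeeping by a two-phase scan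
-- (close the params, then find the first depth-0 '{'); same cost, plainer state.

-- ===== PORT A =====
-- inner `for col, ch in enumerate(lines[i])`: Except.error = the early `return (i, col)`,
-- Except.ok = the state (paren_depth, brace_depth, past_params) after the line.
def aCols (i : Int) (cs : List Char) (col pd bd : Int) (pp : Bool) :
    Except (Int × Int) (Int × Int × Bool) :=
  match cs with
  | [] => .ok (pd, bd, pp)
  | ch :: rest =>
    if ch = '(' then aCols i rest (col + 1) (pd + 1) bd pp
    else if ch = ')' then
      let pd' := pd - 1
      let pp' := if pd' = 0 ∧ pp = false then true else pp
      aCols i rest (col + 1) pd' bd pp'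
    else if ch = '{' then
      if pd = 0 ∧ pp = true then .error (i, col)
      else aCols i rest (col + 1) pd (bd + 1) pp
    else if ch = '}' then
      aCols i rest (col + 1) pd (if pd = 0 then bd - 1 else bd) pp
    else aCols i rest (col + 1) pd bd pp

-- outer `for i in range(start_line, len(lines))`; lines[i] = PySem.List.pyGet?
-- (none = IndexError, excluded by Pre_: the port returns none there)
def aLines (lines : List String) (is : List Int) (pd bd : Int) (pp : Bool) :
    Option (Int × Int) :=
  match is with
  | [] => none
  | i :: rest =>
    match PySem.List.pyGet? lines i with
    | none => none
    | some line =>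
      match aCols i line.toList 0 pd bd pp with
      | .error r => some r
      | .ok (pd', bd', pp') => aLines lines rest pd' bd' pp'

def find_body_brace (lines : List String) (start_line : Int) : Option (Int × Int) :=
  aLines lines (PySem.List.pyRange start_line (lines.length : Int) 1) 0 0 false

-- ===== PORT B =====
-- inner `while col < len(line)` of _scan_body: cs is the remaining characters of the
-- line starting at column col; Except.error = `return (i, col)`, ok = depth after the line.
def bScanCols (i : Int) (cs : List Char) (col depth : Int) : Except (Int × Int) Int :=
  match cs with
  | [] => .ok depth
  | ch :: rest =>
    if ch = '(' then bScanCols i rest (col + 1) (depth + 1)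
    else if ch = ')' then bScanCols i rest (col + 1) (depth - 1)
    else if ch = '{' ∧ depth = 0 then .error (i, col)
    else bScanCols i rest (col + 1) depth

-- outer `while i < n` of _scan_body for the full lines after the first (col = 0)
def bScanLines (lines : List String) (is : List Int) (depth : Int) : Option (Int × Int) :=
  match is with
  | [] => none
  | i :: rest =>
    match PySem.List.pyGet? lines i with
    | none => none
    | some line =>
      match bScanCols i line.toList 0 depth with
      | .error r => some r
      | .ok d => bScanLines lines rest d

-- _scan_body(lines, i, col, n): line i scanned from column col (its chars from col on),
-- then the remaining lines i+1 .. n-1 in full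
def bScanBody (lines : List String) (i col n : Int) : Option (Int × Int) :=
  match PySem.List.pyGet? lines i with
  | none => none
  | some line =>
    match bScanCols i (line.toList.drop col.toNat) col 0 with
    | .error r => some r
    | .ok d => bScanLines lines (PySem.List.pyRange (i + 1) n 1) d

-- phase 1, inner char loop: error (i, col) = the `)` closing the params is at (i, col)
def bPh1Cols (i : Int) (cs : List Char) (col depth : Int) : Except (Int × Int) Int :=
  match cs with
  | [] => .ok depth
  | ch :: rest =>
    if ch = '(' then bPh1Cols i rest (col + 1) (depth + 1)
    else if ch = ')' then
      if depth - 1 = 0 then .error (i, col)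
      else bPh1Cols i rest (col + 1) (depth - 1)
    else bPh1Cols i rest (col + 1) depth

-- phase 1, outer line loop
def bPh1Lines (lines : List String) (is : List Int) (depth n : Int) : Option (Int × Int) :=
  match is with
  | [] => none
  | i :: rest =>
    match PySem.List.pyGet? lines i with
    | none => none
    | some line =>
      match bPh1Cols i line.toList 0 depth with
      | .error (i', c) => bScanBody lines i' (c + 1) n
      | .ok d => bPh1Lines lines rest d n

def find_body_brace_alt (lines : List String) (start_line : Int) : Option (Int × Int) :=
  bPh1Lines lines (PySem.List.pyRange start_line (lines.length : Int) 1) 0 (lines.length : Int)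

-- ===== PRECONDITION & SPEC =====
-- A (and B) raise IndexError iff start_line < -len(lines): the first lines[i] access wraps past the front.
def Pre_find_body_brace (lines : List String) (start_line : Int) : Prop :=
  -(lines.length : Int) ≤ start_line
instance (lines : List String) (start_line : Int) : Decidable (Pre_find_body_brace lines start_line) := by
  unfold Pre_find_body_brace; infer_instance

def pvWitness_find_body_brace : List String × Int := (["fn f(x: u32)", "{ x }"], 0)

def Spec_find_body_brace (lines : List String) (start_line : Int) (out : Option (Int × Int)) : Prop := out = find_body_brace_alt lines start_line
instance (lines : List String) (start_line : Int) (out : Option (Int × Int)) : Decidable (Spec_find_body_brace lines start_line out) := by unfold Spec_find_body_brace; infer_instance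

-- ===== CLAIM (what is proved, stated in full; the proofs are below) =====
def Claim_equal_find_body_brace : Prop := ∀ (lines : List String) (start_line : Int), Dom_find_body_brace lines start_line → Pre_find_body_brace lines start_line → Spec_find_body_brace lines start_line (find_body_brace lines start_line)

-- ===== LEMMAS AND PROOFS =====

-- A with past_params = true is B's phase-2 char scan (brace_depth is dead state).
theorem aCols_true (i : Int) (cs : List Char) :
    ∀ col pd bd,
      (∀ r, bScanCols i cs col pd = .error r → aCols i cs col pd bd true = .error r) ∧
      (∀ d, bScanCols i cs col pd = .ok d →
        ∃ bd', aCols i cs col pd bd true = .ok (d, bd', true)) := by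
  induction cs with
  | nil =>
    intro col pd bd
    refine ⟨?_, ?_⟩
    · intro r h; simp [bScanCols] at h
    · intro d h; simp [bScanCols] at h; simp [aCols, h]
  | cons ch rest ih =>
    intro col pd bd
    by_cases h1 : ch = '('
    · simpa [aCols, bScanCols, h1] using ih (col+1) (pd+1) bd
    · by_cases h2 : ch = ')'
      · simpa [aCols, bScanCols, h1, h2] using ih (col+1) (pd-1) bd
      · by_cases h3 : ch = '{'
        · by_cases h4 : pd = 0
          · refine ⟨?_, ?_⟩
            · intro r h
              simp [bScanCols, h3, h4] at h
              simp [aCols, h3, h4, ← h]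
            · intro d h
              simp [bScanCols, h3, h4] at h
          · constructor
            · intro r h
              have := (ih (col+1) pd (bd+1)).1 r (by simpa [bScanCols, h1, h2, h3, h4] using h)
              simpa [aCols, h1, h2, h3, h4] using this
            · intro d h
              have := (ih (col+1) pd (bd+1)).2 d (by simpa [bScanCols, h1, h2, h3, h4] using h)
              simpa [aCols, h1, h2, h3, h4] using this
        · by_cases h4 : ch = '}'
          · constructor
            · intro r h
              have := (ih (col+1) pd (if pd = 0 then bd - 1 else bd)).1 r
                (by simpa [bScanCols, h1, h2, h3, h4] using h)
              simpa [aCols, h1, h2, h3, h4] using this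
            · intro d h
              have := (ih (col+1) pd (if pd = 0 then bd - 1 else bd)).2 d
                (by simpa [bScanCols, h1, h2, h3, h4] using h)
              simpa [aCols, h1, h2, h3, h4] using this
          · constructor
            · intro r h
              have := (ih (col+1) pd bd).1 r (by simpa [bScanCols, h1, h2, h3, h4] using h)
              simpa [aCols, h1, h2, h3, h4] using this
            · intro d h
              have := (ih (col+1) pd bd).2 d (by simpa [bScanCols, h1, h2, h3, h4] using h)
              simpa [aCols, h1, h2, h3, h4] using this

-- A's line loop with past_params = true is B's phase-2 line loop.
theorem aLines_true (lines : List String) (is : List Int) :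
    ∀ pd bd, aLines lines is pd bd true = bScanLines lines is pd := by
  induction is with
  | nil => intro pd bd; simp [aLines, bScanLines]
  | cons i rest ih =>
    intro pd bd
    cases hg : PySem.List.pyGet? lines i with
    | none => simp [aLines, bScanLines, hg]
    | some line =>
      cases hs : bScanCols i line.toList 0 pd with
      | error r =>
        have := (aCols_true i line.toList 0 pd bd).1 r hs
        simp [aLines, bScanLines, hg, hs, this]
      | ok d =>
        obtain ⟨bd', hbd⟩ := (aCols_true i line.toList 0 pd bd).2 d hs
        simp [aLines, bScanLines, hg, hs, hbd, ih]

-- A with past_params = false is B's phase-1 char scan; when the params close at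
-- column c, A keeps scanning the rest of the line with pd = 0, pp = true.
theorem aCols_false (i : Int) (cs : List Char) :
    ∀ col pd bd,
      (∀ d, bPh1Cols i cs col pd = .ok d →
        ∃ bd', aCols i cs col pd bd false = .ok (d, bd', false)) ∧
      (∀ i' c, bPh1Cols i cs col pd = .error (i', c) →
        i' = i ∧ ∃ pre post : List Char, cs = pre ++ ')' :: post ∧ c = col + pre.length ∧
          ∃ bd2, aCols i cs col pd bd false = aCols i post (c + 1) 0 bd2 true) := by
  induction cs with
  | nil =>
    intro col pd bd
    refine ⟨?_, ?_⟩
    · intro d h; simp [bPh1Cols] at h; simp [aCols, h]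
    · intro i' c h; simp [bPh1Cols] at h
  | cons ch rest ih =>
    intro col pd bd
    by_cases h1 : ch = '('
    · constructor
      · intro d h
        exact (ih (col+1) (pd+1) bd).1 d (by simpa [bPh1Cols, h1] using h) |>.imp
          (fun bd' hb => by simpa [aCols, h1] using hb)
      · intro i' c h
        obtain ⟨hi, pre, post, hcs, hc, hex⟩ :=
          (ih (col+1) (pd+1) bd).2 i' c (by simpa [bPh1Cols, h1] using h)
        obtain ⟨bd2, ha⟩ := hex
        refine ⟨hi, ch :: pre, post, by simp [hcs], by simp [hc]; omega, bd2, ?_⟩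
        simpa [aCols, h1] using ha
    · by_cases h2 : ch = ')'
      · by_cases h4 : pd - 1 = 0
        · constructor
          · intro d h; simp [bPh1Cols, h2, h4] at h
          · intro i' c h
            simp [bPh1Cols, h2, h4] at h
            refine ⟨h.1.symm, [], rest, by simp [h2], by simp [h.2], bd, ?_⟩
            simp [aCols, h2, h4, h.2]
        · constructor
          · intro d h
            exact (ih (col+1) (pd-1) bd).1 d (by simpa [bPh1Cols, h1, h2, h4] using h) |>.imp
              (fun bd' hb => by simpa [aCols, h1, h2, h4] using hb)
          · intro i' c h
            obtain ⟨hi, pre, post, hcs, hc, hex⟩ :=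
              (ih (col+1) (pd-1) bd).2 i' c (by simpa [bPh1Cols, h1, h2, h4] using h)
            obtain ⟨bd2, ha⟩ := hex
            refine ⟨hi, ch :: pre, post, by simp [hcs], by simp [hc]; omega, bd2, ?_⟩
            simpa [aCols, h1, h2, h4] using ha
      · have hstep : ∀ bd2,
            aCols i (ch :: rest) col pd bd2 false = aCols i rest (col+1) pd
              (if ch = '{' then bd2 + 1 else if ch = '}' then (if pd = 0 then bd2 - 1 else bd2) else bd2) false := by
          intro bd2
          by_cases h3 : ch = '{' <;> by_cases h4 : ch = '}' <;> simp [aCols, h1, h2, h3, h4]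
        constructor
        · intro d h
          exact (ih (col+1) pd _).1 d (by simpa [bPh1Cols, h1, h2] using h) |>.imp
            (fun bd' hb => by rw [hstep]; exact hb)
        · intro i' c h
          obtain ⟨hi, pre, post, hcs, hc, hex⟩ :=
            (ih (col+1) pd _).2 i' c (by simpa [bPh1Cols, h1, h2] using h)
          obtain ⟨bd2, ha⟩ := hex
          refine ⟨hi, ch :: pre, post, by simp [hcs], by simp [hc]; omega, bd2, ?_⟩
          rw [hstep]; exact ha

-- the first line of _scan_body: A scanning `post` (the chars after the closing `)`)
-- equals B's bScanBody on the whole line, for line.toList = pre ++ ')' :: post.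
theorem post_drop (pre post : List Char) (c : Int) (hc : c = (pre.length : Int)) :
    (pre ++ ')' :: post).drop (c + 1).toNat = post := by
  have : (c + 1).toNat = pre.length + 1 := by omega
  rw [this]
  simp

-- main loop correspondence over the line range, by downward induction on n - k
theorem aLines_false (lines : List String) (n : Int) (hn : n = (lines.length : Int)) :
    ∀ (fuel : Nat) (k : Int), (n - k).toNat ≤ fuel →
      ∀ pd bd, aLines lines (PySem.List.pyRange k n 1) pd bd false =
        bPh1Lines lines (PySem.List.pyRange k n 1) pd n := by
  intro fuel
  induction fuel with
  | zero =>
    intro k hk pd bd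
    have hkn : ¬ k < n := by omega
    rw [PySem.List.pyRange_one_eq_nil (by omega)]
    simp [aLines, bPh1Lines]
  | succ m ih =>
    intro k hk pd bd
    by_cases hkn : k < n
    · rw [PySem.List.pyRange_one_cons hkn]
      cases hg : PySem.List.pyGet? lines k with
      | none => simp [aLines, bPh1Lines, hg]
      | some line =>
        cases hs : bPh1Cols k line.toList 0 pd with
        | ok d =>
          obtain ⟨bd', hbd⟩ := (aCols_false k line.toList 0 pd bd).1 d hs
          simp only [aLines, bPh1Lines, hg, hs, hbd]
          exact ih (k + 1) (by omega) d bd'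
        | error r =>
          obtain ⟨i', c⟩ := r
          obtain ⟨hi, pre, post, hcs, hc, hex⟩ := (aCols_false k line.toList 0 pd bd).2 i' c hs
          obtain ⟨bd2, ha⟩ := hex
          subst hi
          simp only [aLines, bPh1Lines, hg, hs, ha, bScanBody]
          rw [hcs, post_drop pre post c (by simpa using hc)]
          cases hp : bScanCols i' post (c + 1) 0 with
          | error r2 =>
            have := (aCols_true i' post (c+1) 0 bd2).1 r2 hp
            simp [this]
          | ok d =>
            obtain ⟨bd', hbd⟩ := (aCols_true i' post (c+1) 0 bd2).2 d hp
            simp only [hbd]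
            exact aLines_true lines (PySem.List.pyRange (i' + 1) n 1) d bd'
    · rw [PySem.List.pyRange_one_eq_nil (by omega)]
      simp [aLines, bPh1Lines]

-- ===== VERDICT (by name: the statement is the Claim_ definition above) =====
theorem find_body_brace_spec : Claim_equal_find_body_brace := by
  intro lines start_line _ _
  unfold Spec_find_body_brace find_body_brace find_body_brace_alt
  exact aLines_false lines (lines.length : Int) rfl (((lines.length : Int) - start_line).toNat)
    start_line le_rfl 0 0
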